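-- pv_equiv track=rewrite | github.com/rahulgovind/neo | tests/utils/test_files.py | _analyze_diff
-- ===== SOURCE A (Python) =====
-- def _analyze_diff(diff_text):
--     """Helper method to analyze diff content into structured categories."""
--     diff_lines = diff_text.splitlines()
--
--     return {
--         "header": [line for line in diff_lines if line.startswith("---") or line.startswith("+++") or line.startswith("@@")],
--         "added": [line for line in diff_lines if line.startswith("+") and not line.startswith("++")],
--         "removed": [line for line in diff_lines if line.startswith("-") and not line.startswith("---")],
--         "unchanged": [line.strip() for line in diff_lines if not line.startswith("+") and
--                      not line.startswith("-") and line.strip() and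
--                      not line.startswith("@")]
--     }
-- ===== SOURCE B (Python) =====
-- def _analyze_diff(diff_text):
--     """Single-pass classification of diff lines (simpler: one loop instead of four filtering passes)."""
--     header, added, removed, unchanged = [], [], [], []
--     for line in diff_text.splitlines():
--         if line.startswith("---") or line.startswith("+++") or line.startswith("@@"):
--             header.append(line)
--         elif line.startswith("+"):
--             if not line.startswith("++"):
--                 added.append(line)
--         elif line.startswith("-"):
--             removed.append(line)
--         elif line.startswith("@"):
--             pass
--         else:
--             stripped = line.strip()
--             if stripped:
--                 unchanged.append(stripped)
--     return {"header": header, "added": added, "removed": removed, "unchanged": unchanged}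
-- ===== Notes on version B (the rewrite author's own statement) =====
-- stated objective: simpler
-- what changed: Replaces four independent filtering passes over the split lines (one comprehension per category) with a single classifying loop that appends each line to exactly one of four accumulators via an if/elif chain.
import Mathlib
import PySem

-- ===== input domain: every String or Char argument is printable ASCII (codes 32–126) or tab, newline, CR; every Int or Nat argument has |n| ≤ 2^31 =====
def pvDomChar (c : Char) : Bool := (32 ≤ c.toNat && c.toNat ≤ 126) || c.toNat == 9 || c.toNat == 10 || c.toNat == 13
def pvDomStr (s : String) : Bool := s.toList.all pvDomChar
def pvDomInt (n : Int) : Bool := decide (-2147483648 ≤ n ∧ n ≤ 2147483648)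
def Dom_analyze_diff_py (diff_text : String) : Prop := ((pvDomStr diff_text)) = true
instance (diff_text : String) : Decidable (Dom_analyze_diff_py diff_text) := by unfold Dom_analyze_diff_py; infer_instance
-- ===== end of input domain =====

-- B replaces A's four filtering passes with one classifying loop (objective: simpler).

-- ===== PORT A =====
def analyze_diff_py (diff_text : String) : List (String × List String) :=
  let diff_lines := PySem.Str.splitlines diff_text
  [("header", diff_lines.filter (fun line =>
      PySem.Str.startswith line "---" || PySem.Str.startswith line "+++" || PySem.Str.startswith line "@@")),
   ("added", diff_lines.filter (fun line =>
      PySem.Str.startswith line "+" && !PySem.Str.startswith line "++")),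
   ("removed", diff_lines.filter (fun line =>
      PySem.Str.startswith line "-" && !PySem.Str.startswith line "---")),
   ("unchanged", (diff_lines.filter (fun line =>
      !PySem.Str.startswith line "+" && !PySem.Str.startswith line "-" &&
      !(PySem.Str.strip line == "") && !PySem.Str.startswith line "@")).map PySem.Str.strip)]

-- ===== PORT B =====
def pvStep (acc : List String × List String × List String × List String) (line : String) :
    List String × List String × List String × List String :=
  let (h, a, r, u) := acc
  if PySem.Str.startswith line "---" || PySem.Str.startswith line "+++" || PySem.Str.startswith line "@@" then
    (h ++ [line], a, r, u)
  else if PySem.Str.startswith line "+" then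
    if !PySem.Str.startswith line "++" then (h, a ++ [line], r, u) else (h, a, r, u)
  else if PySem.Str.startswith line "-" then
    (h, a, r ++ [line], u)
  else if PySem.Str.startswith line "@" then
    (h, a, r, u)
  else
    let stripped := PySem.Str.strip line
    if !(stripped == "") then (h, a, r, u ++ [stripped]) else (h, a, r, u)

def analyze_diff_py_alt (diff_text : String) : List (String × List String) :=
  let res := (PySem.Str.splitlines diff_text).foldl pvStep ([], [], [], [])
  [("header", res.1), ("added", res.2.1), ("removed", res.2.2.1), ("unchanged", res.2.2.2)]

-- ===== PRECONDITION & SPEC =====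
def Spec_analyze_diff_py (diff_text : String) (out : List (String × List String)) : Prop := out = analyze_diff_py_alt diff_text
instance (diff_text : String) (out : List (String × List String)) : Decidable (Spec_analyze_diff_py diff_text out) := by unfold Spec_analyze_diff_py; infer_instance

-- ===== CLAIM (what is proved, stated in full; the proofs are below) =====
def Claim_equal_analyze_diff_py : Prop := ∀ (diff_text : String), Dom_analyze_diff_py diff_text → Spec_analyze_diff_py diff_text (analyze_diff_py diff_text)

-- ===== LEMMAS AND PROOFS =====

-- prefixes beginning with different characters cannot both hold
theorem pv_prefix_conflict {cs p q : List Char} {a b : Char} (hab : a ≠ b)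
    (hp : a :: p <+: cs) (hq : b :: q <+: cs) : False := by
  obtain ⟨t, rfl⟩ := hp
  rw [List.cons_append, List.cons_prefix_cons] at hq
  exact hab hq.1.symm

theorem pv_c_conflict {cs : List Char} {a b : Char} {p q : List Char} (hab : a ≠ b)
    (h : PySem.Chars.startswith cs (a :: p) = true) :
    PySem.Chars.startswith cs (b :: q) = false := by
  rw [PySem.Chars.startswith_iff] at h
  rw [← Bool.not_eq_true, PySem.Chars.startswith_iff]
  intro hc
  exact pv_prefix_conflict hab h hc

theorem pv_c_trans {cs p q : List Char} (hpq : p <+: q)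
    (h : PySem.Chars.startswith cs q = true) : PySem.Chars.startswith cs p = true := by
  rw [PySem.Chars.startswith_iff] at h ⊢
  exact hpq.trans h

-- the loop invariant: B's fold equals A's four filters appended to the accumulators
theorem pv_loop (ls : List String) (h a r u : List String) :
    ls.foldl pvStep (h, a, r, u) =
      (h ++ ls.filter (fun line =>
          PySem.Str.startswith line "---" || PySem.Str.startswith line "+++" || PySem.Str.startswith line "@@"),
       a ++ ls.filter (fun line =>
          PySem.Str.startswith line "+" && !PySem.Str.startswith line "++"),
       r ++ ls.filter (fun line =>
          PySem.Str.startswith line "-" && !PySem.Str.startswith line "---"),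
       u ++ (ls.filter (fun line =>
          !PySem.Str.startswith line "+" && !PySem.Str.startswith line "-" &&
          !(PySem.Str.strip line == "") && !PySem.Str.startswith line "@")).map PySem.Str.strip) := by
  induction ls generalizing h a r u with
  | nil => simp
  | cons l ls ih =>
    simp only [List.foldl_cons, List.filter_cons]
    by_cases cH3 : PySem.Chars.startswith l.toList ['-', '-', '-'] = true
    · -- "---" header line
      have cM : PySem.Chars.startswith l.toList ['-'] = true := pv_c_trans (by decide) cH3
      have cP : PySem.Chars.startswith l.toList ['+'] = false := pv_c_conflict (by decide) cM
      have hstep : pvStep (h, a, r, u) l = (h ++ [l], a, r, u) := by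
        simp [pvStep, cH3]
      rw [hstep, ih]
      simp [cH3, cM, cP]
    · by_cases cP3 : PySem.Chars.startswith l.toList ['+', '+', '+'] = true
      · -- "+++" header line
        have cP2 : PySem.Chars.startswith l.toList ['+', '+'] = true := pv_c_trans (by decide) cP3
        have cP : PySem.Chars.startswith l.toList ['+'] = true := pv_c_trans (by decide) cP3
        have cM : PySem.Chars.startswith l.toList ['-'] = false := pv_c_conflict (by decide) cP
        have hstep : pvStep (h, a, r, u) l = (h ++ [l], a, r, u) := by
          simp [pvStep, cP3]
        rw [hstep, ih]
        simp [cP3, cP2, cP, cM]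
      · by_cases cA2 : PySem.Chars.startswith l.toList ['@', '@'] = true
        · -- "@@" header line
          have cA : PySem.Chars.startswith l.toList ['@'] = true := pv_c_trans (by decide) cA2
          have cP : PySem.Chars.startswith l.toList ['+'] = false := pv_c_conflict (by decide) cA
          have cM : PySem.Chars.startswith l.toList ['-'] = false := pv_c_conflict (by decide) cA
          have hstep : pvStep (h, a, r, u) l = (h ++ [l], a, r, u) := by
            simp [pvStep, cA2]
          rw [hstep, ih]
          simp [cA2, cA, cP, cM]
        · -- not a header line
          rw [Bool.not_eq_true] at cH3 cP3 cA2
          by_cases cP : PySem.Chars.startswith l.toList ['+'] = true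
          · have cM : PySem.Chars.startswith l.toList ['-'] = false := pv_c_conflict (by decide) cP
            by_cases cP2 : PySem.Chars.startswith l.toList ['+', '+'] = true
            · have hstep : pvStep (h, a, r, u) l = (h, a, r, u) := by
                simp [pvStep, cH3, cP3, cA2, cP, cP2]
              rw [hstep, ih]
              simp [cH3, cP3, cA2, cP, cP2, cM]
            · rw [Bool.not_eq_true] at cP2
              have hstep : pvStep (h, a, r, u) l = (h, a ++ [l], r, u) := by
                simp [pvStep, cH3, cP3, cA2, cP, cP2]
              rw [hstep, ih]
              simp [cH3, cP3, cA2, cP, cP2, cM]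
          · rw [Bool.not_eq_true] at cP
            by_cases cM : PySem.Chars.startswith l.toList ['-'] = true
            · have hstep : pvStep (h, a, r, u) l = (h, a, r ++ [l], u) := by
                simp [pvStep, cH3, cP3, cA2, cP, cM]
              rw [hstep, ih]
              simp [cH3, cP3, cA2, cP, cM]
            · rw [Bool.not_eq_true] at cM
              by_cases cA : PySem.Chars.startswith l.toList ['@'] = true
              · have hstep : pvStep (h, a, r, u) l = (h, a, r, u) := by
                  simp [pvStep, cH3, cP3, cA2, cP, cM, cA]
                rw [hstep, ih]
                simp [cH3, cP3, cA2, cP, cM, cA]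
              · rw [Bool.not_eq_true] at cA
                by_cases hS : PySem.Str.strip l = ""
                · have hstep : pvStep (h, a, r, u) l = (h, a, r, u) := by
                    simp [pvStep, cH3, cP3, cA2, cP, cM, cA, hS]
                  rw [hstep, ih]
                  simp [cH3, cP3, cA2, cP, cM, cA, hS]
                · have hstep : pvStep (h, a, r, u) l = (h, a, r, u ++ [PySem.Str.strip l]) := by
                    simp [pvStep, cH3, cP3, cA2, cP, cM, cA, hS]
                  rw [hstep, ih]
                  simp [cH3, cP3, cA2, cP, cM, cA, hS]

-- ===== VERDICT (by name: the statement is the Claim_ definition above) =====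
theorem analyze_diff_py_spec : Claim_equal_analyze_diff_py := by
  intro diff_text _
  unfold Spec_analyze_diff_py analyze_diff_py analyze_diff_py_alt
  rw [pv_loop]
  simp
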